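-- pv_equiv track=rewrite | github.com/nguyendai05/Doan_py_process_img_to_VNtext | app/services/summarize_service.py | _np_phrases
-- ===== SOURCE A (Python) =====
-- from typing import Dict, Any, List, Tuple, Set, Optional  # typing  # noqa
--
-- def _np_phrases(tokens: List[str], pos: List[str], ner: List[str]) -> List[str]:
--     out: List[str] = []  # output NP  # noqa
--     buf: List[str] = []  # buffer  # noqa
--
--     def flush():  # đẩy buffer ra  # noqa
--         if len(buf) >= 2:  # NP đủ dài  # noqa
--             out.append(" ".join(buf))  # join NP  # noqa
--         buf.clear()  # reset  # noqa
--
--     for w, p, n in zip(tokens, pos, ner):  # duyệt token  # noqa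
--         if n and n != "O":  # entity token  # noqa
--             flush()  # flush trước  # noqa
--             out.append(w)  # giữ entity như phrase  # noqa
--             continue  # noqa
--
--         p = (p or "").upper()  # normalize POS  # noqa
--         if p.startswith("N") or p.startswith("A"):  # noun/adj  # noqa
--             buf.append(w)  # add token  # noqa
--         else:
--             flush()  # kết thúc NP  # noqa
--
--     flush()  # flush cuối  # noqa
--
--     # unique hoá  # noqa
--     seen: Set[str] = set()  # noqa
--     final: List[str] = []  # noqa
--     for x in out:  # duyệt phrase  # noqa
--         k = x.lower().strip()  # normalize  # noqa
--         if not k or k in seen:  # skip trùng  # noqa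
--             continue  # noqa
--         seen.add(k)  # mark seen  # noqa
--         final.append(x.strip())  # add  # noqa
--     return final  # noqa
-- ===== SOURCE B (Python) =====
-- from typing import List
--
--
-- def _np_phrases(tokens: List[str], pos: List[str], ner: List[str]) -> List[str]:
--     # Pass 1: classify every token once, up front.
--     def tag(p: str, n: str) -> str:
--         if n and n != "O":
--             return "E"
--         q = (p or "").upper()
--         return "R" if (q.startswith("N") or q.startswith("A")) else "X"
--
--     tagged = [(tag(p, n), w) for w, p, n in zip(tokens, pos, ner)]
--
--     # Pass 2: index scan; group each maximal noun/adj run with an inner while.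
--     phrases: List[str] = []
--     i, m = 0, len(tagged)
--     while i < m:
--         t, w = tagged[i]
--         if t == "E":
--             phrases.append(w)
--             i += 1
--         elif t == "R":
--             j = i + 1
--             while j < m and tagged[j][0] == "R":
--                 j += 1
--             if j - i >= 2:
--                 phrases.append(" ".join(w2 for _, w2 in tagged[i:j]))
--             i = j
--         else:
--             i += 1
--
--     # Pass 3: dedup by lowered/stripped key, keeping first occurrences.
--     seen = set()
--     final: List[str] = []
--     for x in phrases:
--         k = x.lower().strip()
--         if k and k not in seen:
--             seen.add(k)
--             final.append(x.strip())
--     return final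
-- ===== Notes on version B (the rewrite author's own statement) =====
-- stated objective: alternative
-- what changed: Replaces A's per-token state machine with a mutated buffer and flush closure by a three-pass pipeline: classify every token up front, then an index/while scan that extracts each maximal noun/adj run in one inner loop, then a first-occurrence dedup keyed by the lowered stripped phrase.
import Mathlib
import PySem

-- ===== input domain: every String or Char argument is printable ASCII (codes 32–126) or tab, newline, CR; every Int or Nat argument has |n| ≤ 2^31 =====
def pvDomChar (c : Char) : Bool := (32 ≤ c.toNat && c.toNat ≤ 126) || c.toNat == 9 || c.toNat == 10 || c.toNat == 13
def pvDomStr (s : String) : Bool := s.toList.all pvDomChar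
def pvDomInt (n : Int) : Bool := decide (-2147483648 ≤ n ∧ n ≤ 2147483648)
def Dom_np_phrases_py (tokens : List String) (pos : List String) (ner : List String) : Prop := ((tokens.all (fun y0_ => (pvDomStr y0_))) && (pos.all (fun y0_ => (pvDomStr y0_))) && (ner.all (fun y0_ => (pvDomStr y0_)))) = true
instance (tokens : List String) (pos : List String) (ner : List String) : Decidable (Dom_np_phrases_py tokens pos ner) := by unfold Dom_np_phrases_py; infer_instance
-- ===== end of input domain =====

-- B replaces A's per-token state machine (buffer + flush closure) by a classify pass,
-- an index scan extracting each maximal noun/adj run, and a first-occurrence dedup pass.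

-- ===== PORT A =====
-- flush(): emit the buffer (only if it holds ≥ 2 words), then clear it; state = (out, buf)
def pvFlushA (s : List String × List String) : List String × List String :=
  (if 2 ≤ s.2.length then s.1 ++ [PySem.Str.join " " s.2] else s.1, [])

-- the 'for w, p, n in zip(...)' loop of A, carrying (out, buf)
def pvLoopA : List String × List String → List (String × String × String) → List String × List String
  | s, [] => s
  | s, (w, p, n) :: zs =>
    if !(n == "") && !(n == "O") then
      pvLoopA ((pvFlushA s).1 ++ [w], []) zs
    else
      let p2 := PySem.Str.upper (if p == "" then "" else p)
      if PySem.Str.startswith p2 "N" || PySem.Str.startswith p2 "A" then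
        pvLoopA (s.1, s.2 ++ [w]) zs
      else
        pvLoopA (pvFlushA s) zs

def np_phrases_py (tokens : List String) (pos : List String) (ner : List String) : List String :=
  let out := (pvFlushA (pvLoopA ([], []) (tokens.zip (pos.zip ner)))).1
  -- unique hoá: seen is a Python set, final the kept phrases
  (out.foldl (fun (st : PySem.Set String × List String) x =>
      let k := PySem.Str.strip (PySem.Str.lower x)
      if k == "" || PySem.Set.contains st.1 k then st
      else (PySem.Set.add st.1 k, st.2 ++ [PySem.Str.strip x]))
    (PySem.Set.empty, [])).2

-- ===== PORT B =====
-- pass 1: classify one token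
def pvTagB (p : String) (n : String) : String :=
  if !(n == "") && !(n == "O") then "E"
  else
    let q := PySem.Str.upper (if p == "" then "" else p)
    if PySem.Str.startswith q "N" || PySem.Str.startswith q "A" then "R" else "X"

-- pass 2: the outer while over indices; the inner 'while tagged[j][0]=="R"' is the
-- takeWhile/dropWhile split of the remaining list (exact: it collects the maximal run)
def pvScanB : List (String × String) → List String
  | [] => []
  | (t, w) :: rest =>
    if t == "E" then w :: pvScanB rest
    else if t == "R" then
      let run := w :: (rest.takeWhile (fun tw => tw.1 == "R")).map Prod.snd
      (if 2 ≤ run.length then [PySem.Str.join " " run] else [])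
        ++ pvScanB (rest.dropWhile (fun tw => tw.1 == "R"))
    else pvScanB rest
termination_by l => l.length
decreasing_by
  · simp
  · exact Nat.lt_succ_of_le (List.length_dropWhile_le _ _)
  · simp

def np_phrases_py_alt (tokens : List String) (pos : List String) (ner : List String) : List String :=
  let tagged := (tokens.zip (pos.zip ner)).map (fun z => (pvTagB z.2.1 z.2.2, z.1))
  let phrases := pvScanB tagged
  -- pass 3: dedup keyed by lowered/stripped phrase, keeping first occurrences
  (phrases.foldl (fun (st : PySem.Set String × List String) x =>
      let k := PySem.Str.strip (PySem.Str.lower x)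
      if !(k == "") && !(PySem.Set.contains st.1 k) then (PySem.Set.add st.1 k, st.2 ++ [PySem.Str.strip x])
      else st)
    (PySem.Set.empty, [])).2

-- ===== PRECONDITION & SPEC =====
def Spec_np_phrases_py (tokens : List String) (pos : List String) (ner : List String) (out : List String) : Prop := out = np_phrases_py_alt tokens pos ner
instance (tokens : List String) (pos : List String) (ner : List String) (out : List String) : Decidable (Spec_np_phrases_py tokens pos ner out) := by unfold Spec_np_phrases_py; infer_instance

-- ===== CLAIM (what is proved, stated in full; the proofs are below) =====
def Claim_equal_np_phrases_py : Prop := ∀ (tokens : List String) (pos : List String) (ner : List String), Dom_np_phrases_py tokens pos ner → Spec_np_phrases_py tokens pos ner (np_phrases_py tokens pos ner)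

-- ===== LEMMAS AND PROOFS =====

-- abstract emission of a finished buffer
def pvEmit (buf : List String) : List String :=
  if 2 ≤ buf.length then [PySem.Str.join " " buf] else []

-- entity / run conditions exactly as both ports test them
def pvEnt (n : String) : Bool := !(n == "") && !(n == "O")
def pvRun (p : String) : Bool :=
  PySem.Str.startswith (PySem.Str.upper (if p == "" then "" else p)) "N"
    || PySem.Str.startswith (PySem.Str.upper (if p == "" then "" else p)) "A"

theorem pvLoopA_cons (s : List String × List String) (w p n : String)
    (zs : List (String × String × String)) :
    pvLoopA s ((w, p, n) :: zs)
      = if pvEnt n then pvLoopA ((pvFlushA s).1 ++ [w], []) zs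
        else if pvRun p then pvLoopA (s.1, s.2 ++ [w]) zs
        else pvLoopA (pvFlushA s) zs := rfl

theorem pvTagB_cases (p n : String) :
    pvTagB p n = if pvEnt n then "E" else if pvRun p then "R" else "X" := rfl

-- A's loop, abstracted: phrases still to be produced from pending buffer `buf` and input `zs`
def pvSpecA (buf : List String) : List (String × String × String) → List String
  | [] => pvEmit buf
  | (w, p, n) :: zs =>
    if pvEnt n then pvEmit buf ++ w :: pvSpecA [] zs
    else if pvRun p then pvSpecA (buf ++ [w]) zs
    else pvEmit buf ++ pvSpecA [] zs

theorem pvFlushA_fst (s : List String × List String) :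
    (pvFlushA s).1 = s.1 ++ pvEmit s.2 := by
  unfold pvFlushA pvEmit; split <;> simp

theorem pvLoopA_char (zs : List (String × String × String)) :
    ∀ out buf, (pvFlushA (pvLoopA (out, buf) zs)).1 = out ++ pvSpecA buf zs := by
  induction zs with
  | nil => intro out buf; simp [pvLoopA, pvSpecA, pvFlushA_fst]
  | cons z zs ih =>
    obtain ⟨w, p, n⟩ := z
    intro out buf
    rw [pvLoopA_cons]
    cases hE : pvEnt n with
    | true =>
      rw [if_pos rfl, ih, pvFlushA_fst]
      simp [pvSpecA, hE]
    | false =>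
      rw [if_neg (by simp)]
      cases hR : pvRun p with
      | true =>
        rw [if_pos rfl, ih]
        simp [pvSpecA, hE, hR]
      | false =>
        rw [if_neg (by simp)]
        have : pvFlushA (out, buf) = ((pvFlushA (out, buf)).1, []) := rfl
        rw [this, ih, pvFlushA_fst]
        simp [pvSpecA, hE, hR]

-- predicate for membership in a noun/adj run (entity check comes first in both programs)
def pvSeg (z : String × String × String) : Bool := !pvEnt z.2.2 && pvRun z.2.1

def pvTagOf (z : String × String × String) : String × String := (pvTagB z.2.1 z.2.2, z.1)

theorem pvSeg_iff_tag (z : String × String × String) :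
    ((fun tw : String × String => tw.1 == "R") ∘ pvTagOf) z = pvSeg z := by
  obtain ⟨w, p, n⟩ := z
  simp only [Function.comp, pvTagOf, pvTagB_cases, pvSeg]
  cases hE : pvEnt n
  · cases hR : pvRun p <;> simp
  · simp

-- remainder after a maximal run: the next token (if any) is not a run token
def pvRest : List (String × String × String) → List String
  | [] => []
  | (w, _, n) :: zs => if pvEnt n then w :: pvSpecA [] zs else pvSpecA [] zs

theorem pvSpecA_run (zs : List (String × String × String)) :
    ∀ buf, pvSpecA buf zs
      = pvEmit (buf ++ (zs.takeWhile pvSeg).map (fun z => z.1)) ++ pvRest (zs.dropWhile pvSeg) := by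
  induction zs with
  | nil => intro buf; simp [pvSpecA, pvRest]
  | cons z zs ih =>
    obtain ⟨w, p, n⟩ := z
    intro buf
    cases hE : pvEnt n with
    | true =>
      have hs : pvSeg (w, p, n) = false := by simp [pvSeg, hE]
      rw [List.takeWhile_cons_of_neg (by simp [hs]), List.dropWhile_cons_of_neg (by simp [hs])]
      simp [pvSpecA, pvRest, hE]
    | false =>
      cases hR : pvRun p with
      | true =>
        have hs : pvSeg (w, p, n) = true := by simp [pvSeg, hE, hR]
        rw [List.takeWhile_cons_of_pos hs, List.dropWhile_cons_of_pos hs]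
        rw [show pvSpecA buf ((w, p, n) :: zs) = pvSpecA (buf ++ [w]) zs from by
          simp [pvSpecA, hE, hR]]
        rw [ih]
        have hl : buf ++ [w] ++ (zs.takeWhile pvSeg).map (fun z => z.1)
            = buf ++ w :: (zs.takeWhile pvSeg).map (fun z => z.1) := by simp
        rw [hl]
        simp
      | false =>
        have hs : pvSeg (w, p, n) = false := by simp [pvSeg, hR]
        rw [List.takeWhile_cons_of_neg (by simp [hs]), List.dropWhile_cons_of_neg (by simp [hs])]
        simp [pvSpecA, pvRest, hE, hR]

theorem pvDropWhile_head_false {p : String} {n w : String}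
    {zs r : List (String × String × String)}
    (h : zs.dropWhile pvSeg = (w, p, n) :: r) : pvSeg (w, p, n) = false := by
  induction zs with
  | nil => simp at h
  | cons z zs ih =>
    by_cases hz : pvSeg z = true
    · rw [List.dropWhile_cons_of_pos hz] at h; exact ih h
    · rw [List.dropWhile_cons_of_neg hz] at h
      injection h with h1 h2
      rw [← h1]
      simpa using hz

theorem pvSpecA_eq_scanB : ∀ (k : Nat) (zs : List (String × String × String)), zs.length ≤ k →
    pvSpecA [] zs = pvScanB (zs.map pvTagOf) := by
  intro k
  induction k with
  | zero =>
    intro zs h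
    rw [List.length_eq_zero_iff.mp (Nat.le_zero.mp h)]
    simp [pvSpecA, pvScanB, pvEmit]
  | succ k ih =>
    intro zs hlen
    match zs with
    | [] => simp [pvSpecA, pvScanB, pvEmit]
    | (w, p, n) :: zs =>
      simp only [List.length_cons, Nat.succ_le_succ_iff] at hlen
      cases hE : pvEnt n with
      | true =>
        rw [show pvSpecA [] ((w, p, n) :: zs) = pvEmit [] ++ w :: pvSpecA [] zs from by
          simp [pvSpecA, hE]]
        simp only [List.map_cons, pvTagOf, pvTagB_cases, hE, if_true, pvScanB]
        rw [if_pos (by decide : (("E" : String) == "E") = true)]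
        simp [pvEmit, ih zs hlen]
      | false =>
        cases hR : pvRun p with
        | true =>
          simp only [List.map_cons, pvTagOf, pvTagB_cases, hE, hR, Bool.false_eq_true,
            if_false, if_true, pvScanB]
          rw [if_neg (by decide), if_pos (by decide : (("R" : String) == "R") = true)]
          rw [show pvSpecA [] ((w, p, n) :: zs) = pvSpecA ([] ++ [w]) zs from by
            simp [pvSpecA, hE, hR]]
          rw [pvSpecA_run]
          have hpred : ((fun tw : String × String => tw.1 == "R") ∘ pvTagOf) = pvSeg :=
            funext pvSeg_iff_tag
          have hmapT : (zs.map pvTagOf).takeWhile (fun tw => tw.1 == "R")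
              = (zs.takeWhile pvSeg).map pvTagOf := by
            rw [List.takeWhile_map, hpred]
          have hmapD : (zs.map pvTagOf).dropWhile (fun tw => tw.1 == "R")
              = (zs.dropWhile pvSeg).map pvTagOf := by
            rw [List.dropWhile_map, hpred]
          rw [hmapT, hmapD]
          have hwords : ((zs.takeWhile pvSeg).map pvTagOf).map Prod.snd
              = (zs.takeWhile pvSeg).map (fun z => z.1) := by
            simp [pvTagOf, Function.comp]
          rw [hwords]
          congr 1
          have hdlen : (zs.dropWhile pvSeg).length ≤ k :=
            le_trans (List.length_dropWhile_le _ _) hlen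
          cases hdrop : zs.dropWhile pvSeg with
          | nil => simp [pvRest, pvScanB]
          | cons z' r =>
            obtain ⟨w', p', n'⟩ := z'
            have hs' : pvSeg (w', p', n') = false := pvDropWhile_head_false hdrop
            have hrlen : r.length ≤ k := by
              rw [hdrop] at hdlen; simpa using Nat.le_of_succ_le hdlen
            cases hE' : pvEnt n' with
            | true =>
              rw [show pvRest ((w', p', n') :: r) = w' :: pvSpecA [] r from by
                simp [pvRest, hE']]
              simp only [List.map_cons, pvTagOf, pvTagB_cases, hE', if_true, pvScanB]
              rw [if_pos (by decide : (("E" : String) == "E") = true)]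
              rw [ih r hrlen]
            | false =>
              have hR' : pvRun p' = false := by
                unfold pvSeg at hs'
                simpa [hE'] using hs'
              rw [show pvRest ((w', p', n') :: r) = pvSpecA [] r from by
                simp [pvRest, hE']]
              simp only [List.map_cons, pvTagOf, pvTagB_cases, hE', hR', Bool.false_eq_true,
                if_false, pvScanB]
              rw [if_neg (by decide), if_neg (by decide)]
              exact ih r hrlen
        | false =>
          rw [show pvSpecA [] ((w, p, n) :: zs) = pvEmit [] ++ pvSpecA [] zs from by
            simp [pvSpecA, hE, hR]]
          simp only [List.map_cons, pvTagOf, pvTagB_cases, hE, hR, Bool.false_eq_true,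
            if_false, pvScanB]
          rw [if_neg (by decide), if_neg (by decide)]
          simp [pvEmit, ih zs hlen]

-- the two dedup folds are the same function
theorem pvDedup_eq (out : List String) :
    (out.foldl (fun (st : PySem.Set String × List String) x =>
        let k := PySem.Str.strip (PySem.Str.lower x)
        if k == "" || PySem.Set.contains st.1 k then st
        else (PySem.Set.add st.1 k, st.2 ++ [PySem.Str.strip x]))
      (PySem.Set.empty, [])).2
    = (out.foldl (fun (st : PySem.Set String × List String) x =>
        let k := PySem.Str.strip (PySem.Str.lower x)
        if !(k == "") && !(PySem.Set.contains st.1 k) then (PySem.Set.add st.1 k, st.2 ++ [PySem.Str.strip x])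
        else st)
      (PySem.Set.empty, [])).2 := by
  have hfun : (fun (st : PySem.Set String × List String) x =>
        let k := PySem.Str.strip (PySem.Str.lower x)
        if k == "" || PySem.Set.contains st.1 k then st
        else (PySem.Set.add st.1 k, st.2 ++ [PySem.Str.strip x]))
      = (fun (st : PySem.Set String × List String) x =>
        let k := PySem.Str.strip (PySem.Str.lower x)
        if !(k == "") && !(PySem.Set.contains st.1 k) then (PySem.Set.add st.1 k, st.2 ++ [PySem.Str.strip x])
        else st) := by
    funext st x
    simp only [PySem.Set.contains, PySem.Set.add]
    by_cases h1 : PySem.Str.strip (PySem.Str.lower x) == "" <;>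
      by_cases h2 : PySem.Str.strip (PySem.Str.lower x) ∈ st.1 <;>
        simp [h1, h2]
  rw [hfun]

-- ===== VERDICT (by name: the statement is the Claim_ definition above) =====
theorem np_phrases_py_spec : Claim_equal_np_phrases_py := by
  intro tokens pos ner _
  unfold Spec_np_phrases_py np_phrases_py np_phrases_py_alt
  rw [pvDedup_eq]
  have h1 := pvLoopA_char (tokens.zip (pos.zip ner)) [] []
  have h2 := pvSpecA_eq_scanB (tokens.zip (pos.zip ner)).length (tokens.zip (pos.zip ner)) le_rfl
  have htag : ((tokens.zip (pos.zip ner)).map (fun z => (pvTagB z.2.1 z.2.2, z.1)))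
      = (tokens.zip (pos.zip ner)).map pvTagOf := rfl
  simp only [htag]
  rw [show (pvFlushA (pvLoopA ([], []) (tokens.zip (pos.zip ner)))).1
      = pvSpecA [] (tokens.zip (pos.zip ner)) by simpa using h1, h2]
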